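-- pv_equiv track=rewrite | github.com/daniel-reich/ubiquitous-fiesta | 6DppMcokmzJ3TtNNB_20.py | true_alphabetic
-- ===== SOURCE A (Python) =====
-- def true_alphabetic(t):
--   s,si,res = sorted(t.replace(' ','')),0,''
--   for c in t:
--     if c.isalpha():
--       res += s[si]
--       si += 1
--     else:
--       res += ' '
--   return res
-- ===== SOURCE B (Python) =====
-- def true_alphabetic(t):
--   counts = {}
--   for c in t:
--     if c != ' ':
--       counts[c] = counts.get(c, 0) + 1
--   stream = iter([k for k in sorted(counts) for _ in range(counts[k])])
--   return ''.join(next(stream) if c.isalpha() else ' ' for c in t)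
-- ===== Notes on version B (the rewrite author's own statement) =====
-- stated objective: alternative
-- what changed: Replaces the comparison sort of all non-space characters with a counting sort (frequency dict built in one filtered pass, only the distinct keys sorted, the ordered stream rebuilt by repetition) and replaces A's index-driven string concatenation with a single join over a stream iterator consumed head-first.
import Mathlib
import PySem

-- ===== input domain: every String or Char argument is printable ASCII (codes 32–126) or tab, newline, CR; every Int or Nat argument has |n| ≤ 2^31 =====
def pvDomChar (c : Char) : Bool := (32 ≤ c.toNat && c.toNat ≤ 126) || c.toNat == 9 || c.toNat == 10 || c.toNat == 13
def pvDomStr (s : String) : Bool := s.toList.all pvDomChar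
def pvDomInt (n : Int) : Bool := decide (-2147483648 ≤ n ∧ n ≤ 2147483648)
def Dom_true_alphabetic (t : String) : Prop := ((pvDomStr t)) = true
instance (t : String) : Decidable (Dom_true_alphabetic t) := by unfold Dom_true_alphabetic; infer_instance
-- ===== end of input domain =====

-- B replaces the comparison sort of all non-space characters by a counting sort
-- (frequency dict built in one filtered pass, distinct keys only sorted, stream rebuilt
-- by repetition) consumed head-first by a single join; equal return value on every input.

-- ===== PORT A =====
-- s[si] is ported as pyGet? with default ' ': the index is provably always in range
-- (the number of alphabetic characters never exceeds the length of the space-free sort),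
-- so the Python never raises and the default is never used.
def true_alphabetic (t : String) : String :=
  let s := PySem.List.sorted (PySem.Chars.replace t.toList [' '] []) (fun x => x) false
  let r := t.toList.foldl (fun (st : List Char × Int) c =>
      if PySem.Chars.isalpha c then (st.1 ++ [(PySem.List.pyGet? s st.2).getD ' '], st.2 + 1)
      else (st.1 ++ [' '], st.2)) ([], 0)
  String.ofList r.1

-- ===== PORT B =====
-- next(stream) in the genexp is ported as headD ' ' and tail: the iterator is provably
-- never exhausted when an alphabetic character is reached, so the default is never used.
def pvConsume (cs : List Char) (stream : List Char) : List Char :=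
  match cs with
  | [] => []
  | c :: rest =>
    if PySem.Chars.isalpha c then stream.headD ' ' :: pvConsume rest stream.tail
    else ' ' :: pvConsume rest stream

def true_alphabetic_alt (t : String) : String :=
  let counts := t.toList.foldl (fun d c =>
      if c ≠ ' ' then PySem.Dict.insert d c (PySem.Dict.getD d c 0 + 1) else d)
      (PySem.Dict.empty : PySem.Dict Char Int)
  let stream := (PySem.List.sorted (PySem.Dict.keys counts) (fun x => x) false).flatMap
      (fun k => List.replicate (PySem.Dict.getD counts k 0).toNat k)
  String.ofList (pvConsume t.toList stream)

-- ===== PRECONDITION & SPEC =====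
def Spec_true_alphabetic (t : String) (out : String) : Prop := out = true_alphabetic_alt t
instance (t : String) (out : String) : Decidable (Spec_true_alphabetic t out) := by unfold Spec_true_alphabetic; infer_instance

-- ===== CLAIM (what is proved, stated in full; the proofs are below) =====
def Claim_equal_true_alphabetic : Prop := ∀ (t : String), Dom_true_alphabetic t → Spec_true_alphabetic t (true_alphabetic t)

-- ===== LEMMAS AND PROOFS =====

-- replacing ' ' by '' is the same list as filtering out spaces
lemma replace_go_space (cs acc : List Char) (fuel : Nat) (h : cs.length ≤ fuel) :
    PySem.Chars.replace.go [' '] [] fuel cs acc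
      = acc.reverse ++ cs.filter (fun c => c ≠ ' ') := by
  induction cs generalizing acc fuel with
  | nil => cases fuel <;> simp [PySem.Chars.replace.go]
  | cons c rest ih =>
    cases fuel with
    | zero => simp at h
    | succ fuel =>
      simp only [List.length_cons, Nat.succ_le_succ_iff] at h
      by_cases hc : c = ' '
      · subst hc
        simp [PySem.Chars.replace.go, List.isPrefixOf, ih _ _ h]
      · have hp : List.isPrefixOf [' '] (c :: rest) = false := by
          simp [List.isPrefixOf]; intro h'; exact absurd h'.symm hc
        simp [PySem.Chars.replace.go, hp, ih (c :: acc) _ h, hc]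

lemma replace_space_eq_filter (cs : List Char) :
    PySem.Chars.replace cs [' '] [] = cs.filter (fun c => c ≠ ' ') := by
  simp [PySem.Chars.replace, replace_go_space cs [] cs.length le_rfl]

-- B's guarded counting foldl is the counter of the space-filtered list
lemma counts_eq_counter (cs : List Char) :
    cs.foldl (fun d c =>
        if c ≠ ' ' then PySem.Dict.insert d c (PySem.Dict.getD d c 0 + 1) else d)
      (PySem.Dict.empty : PySem.Dict Char Int)
      = PySem.Dict.counter (cs.filter (fun c => c ≠ ' ')) := by
  rw [← PySem.Dict.foldl_insert_getD_add_one_eq_counter]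
  generalize (PySem.Dict.empty : PySem.Dict Char Int) = d
  induction cs generalizing d with
  | nil => rfl
  | cons c rest ih =>
    simp only [List.foldl_cons, List.filter_cons]
    by_cases hc : c = ' '
    · rw [if_neg (by simp [hc]), if_neg (by simp [hc])]
      exact ih d
    · rw [if_pos hc, if_pos (by simp [hc]), List.foldl_cons]
      exact ih _

-- counting the elements of the rebuilt stream, for a nodup key list
lemma count_flatMap_replicate (a : Char) (keys : List Char) (cnt : Char → Nat)
    (hnd : keys.Nodup) :
    (keys.flatMap (fun k => List.replicate (cnt k) k)).count a
      = if a ∈ keys then cnt a else 0 := by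
  induction keys with
  | nil => simp
  | cons k ks ih =>
    simp only [List.flatMap_cons, List.count_append, List.count_replicate,
      List.mem_cons, List.nodup_cons] at *
    rcases hnd with ⟨hk, hnd⟩
    by_cases hak : a = k
    · subst hak
      simp [ih hnd, hk]
    · simp [hak, Ne.symm hak, ih hnd]

-- the rebuilt stream is sorted when the keys are strictly increasing
lemma pairwise_flatMap_replicate (keys : List Char) (cnt : Char → Nat)
    (h : keys.Pairwise (· < ·)) :
    (keys.flatMap (fun k => List.replicate (cnt k) k)).Pairwise (· ≤ ·) := by
  induction keys with
  | nil => simp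
  | cons k ks ih =>
    rcases List.pairwise_cons.mp h with ⟨hk, hks⟩
    simp only [List.flatMap_cons]
    rw [List.pairwise_append]
    refine ⟨?_, ih hks, ?_⟩
    · exact List.pairwise_replicate.mpr (Or.inr (le_refl k))
    · intro x hx y hy
      rcases List.eq_of_mem_replicate hx with rfl
      rcases List.mem_flatMap.mp hy with ⟨k2, hk2, hy2⟩
      rw [List.eq_of_mem_replicate hy2]
      exact le_of_lt (hk k2 hk2)

-- counting sort: sorting a list equals repeating each sorted distinct element by its count
lemma countsort_eq (cs : List Char) :
    PySem.List.sorted cs (fun x => x) false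
      = (PySem.List.sorted (PySem.Set.ofList cs) (fun x => x) false).flatMap
          (fun k => List.replicate (cs.count k) k) := by
  set keys := PySem.List.sorted (PySem.Set.ofList cs) (fun x => x) false with hkeys
  have hlt : keys.Pairwise (· < ·) := PySem.List.sorted_ofList_pairwise_lt cs
  have hnd : keys.Nodup := hlt.imp (fun h => ne_of_lt h)
  have hmem : ∀ a, a ∈ keys ↔ a ∈ cs := by
    intro a
    rw [hkeys, PySem.List.mem_sorted, PySem.Set.mem_ofList]
  have hperm : (keys.flatMap (fun k => List.replicate (cs.count k) k)).Perm cs := by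
    rw [List.perm_iff_count]
    intro a
    rw [count_flatMap_replicate a keys (fun k => cs.count k) hnd]
    by_cases ha : a ∈ cs
    · simp [(hmem a).mpr ha]
    · simp [hmem a, ha, List.count_eq_zero_of_not_mem ha]
  exact PySem.List.sorted_id_eq_of_perm_of_pairwise cs _ hperm
    (pairwise_flatMap_replicate keys _ hlt)

-- A's index-driven append loop equals B's head-first consumption of the same stream
lemma foldl_eq_consume (cs s : List Char) (acc : List Char) (i : Nat) :
    (cs.foldl (fun (st : List Char × Int) c =>
        if PySem.Chars.isalpha c then (st.1 ++ [(PySem.List.pyGet? s st.2).getD ' '], st.2 + 1)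
        else (st.1 ++ [' '], st.2)) (acc, (i : Int))).1
      = acc ++ pvConsume cs (s.drop i) := by
  induction cs generalizing acc i with
  | nil => simp [pvConsume]
  | cons c rest ih =>
    by_cases hc : PySem.Chars.isalpha c
    · have hget : (PySem.List.pyGet? s ((i : Nat) : Int)).getD ' ' = (s.drop i).headD ' ' := by
        rw [PySem.List.pyGet?_natCast]
        cases hlt : s[i]? with
        | none =>
          have : s.length ≤ i := by
            by_contra h
            exact absurd hlt (by simp [List.getElem?_eq_getElem (lt_of_not_ge h)])
          simp [List.drop_eq_nil_of_le this]
        | some v =>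
          have hi : i < s.length := by
            by_contra h
            simp [List.getElem?_eq_none (le_of_not_gt h)] at hlt
          simp [hlt, List.head?_drop]
      have hcast : ((i : Int) + 1) = ((i + 1 : Nat) : Int) := by push_cast; ring
      simp only [List.foldl_cons, if_pos hc, hget, hcast]
      rw [ih (acc ++ [(s.drop i).headD ' ']) (i + 1)]
      have htail : (s.drop i).tail = s.drop (i + 1) := by
        rw [List.tail_drop]
      simp [pvConsume, hc, htail]
    · simp only [List.foldl_cons, if_neg hc]
      rw [ih (acc ++ [' ']) i]
      simp [pvConsume, hc]

-- ===== VERDICT (by name: the statement is the Claim_ definition above) =====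
theorem true_alphabetic_spec : Claim_equal_true_alphabetic := by
  intro t _
  unfold Spec_true_alphabetic
  simp only [true_alphabetic, true_alphabetic_alt]
  rw [counts_eq_counter, ← replace_space_eq_filter]
  have h := foldl_eq_consume t.toList
    (PySem.List.sorted (PySem.Chars.replace t.toList [' '] []) (fun x => x) false) [] 0
  simp only [Nat.cast_zero, List.drop_zero, List.nil_append] at h
  rw [h, countsort_eq (PySem.Chars.replace t.toList [' '] [])]
  simp [PySem.Dict.getD_counter, PySem.Dict.keys_counter]
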